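-- pv_equiv track=rewrite | github.com/shiqstone/cnn_001 | check_homework.py | block2chars
-- ===== SOURCE A (Python) =====
-- def block2chars(arr, w, h, row_top, block_left):
--     inLine = False
--     start = 0
--     char_mark_boxs = []
--     abs_char_mark_boxs = []
--
--     for i in range(0, len(arr)):
--         if inLine == False and arr[i] > 0:
--             inLine = True
--             start = i
--         elif i - start > 5 and arr[i] < 1 and inLine:
--             inLine = False
--             left = max(start-1, 0)
--             right = min(w, i+1)
--             box = [left, 0, right, h]
--             char_mark_boxs.append(box)
--             abs_box = [block_left + left, row_top, block_left + right, row_top + h]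
--             abs_char_mark_boxs.append(abs_box)
--     return char_mark_boxs, abs_char_mark_boxs
-- ===== SOURCE B (Python) =====
-- def block2chars(arr, w, h, row_top, block_left):
--     n = len(arr)
--     char_mark_boxs = []
--     abs_char_mark_boxs = []
--     i = 0
--     while i < n:
--         if arr[i] > 0:
--             start = i
--             j = start + 1
--             while j < n and not (j - start > 5 and arr[j] < 1):
--                 j += 1
--             if j == n:
--                 break
--             left = max(start - 1, 0)
--             right = min(w, j + 1)
--             char_mark_boxs.append([left, 0, right, h])
--             abs_char_mark_boxs.append([block_left + left, row_top, block_left + right, row_top + h])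
--             i = j + 1
--         else:
--             i += 1
--     return char_mark_boxs, abs_char_mark_boxs
-- ===== Notes on version B (the rewrite author's own statement) =====
-- stated objective: alternative
-- what changed: Replaces A's flag-based single pass (inLine/start state, boxes appended to accumulators) by an explicit index-driven scan: an outer loop jumps to the next segment start, an inner loop finds its closing index, and the result lists are built front-to-back by cons/append at segment granularity.
import Mathlib
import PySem

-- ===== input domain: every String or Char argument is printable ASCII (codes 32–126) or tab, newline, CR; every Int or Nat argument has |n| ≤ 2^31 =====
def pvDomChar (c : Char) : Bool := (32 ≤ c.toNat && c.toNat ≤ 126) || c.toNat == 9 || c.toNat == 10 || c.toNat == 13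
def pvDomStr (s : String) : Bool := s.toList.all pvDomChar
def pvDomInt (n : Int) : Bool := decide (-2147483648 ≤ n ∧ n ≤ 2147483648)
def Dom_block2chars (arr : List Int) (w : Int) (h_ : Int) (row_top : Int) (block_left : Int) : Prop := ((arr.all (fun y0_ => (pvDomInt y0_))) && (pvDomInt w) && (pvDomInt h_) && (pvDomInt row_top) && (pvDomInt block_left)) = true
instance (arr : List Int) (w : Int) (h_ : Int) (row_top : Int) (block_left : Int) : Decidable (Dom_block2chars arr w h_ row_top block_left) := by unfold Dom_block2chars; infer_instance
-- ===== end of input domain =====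

-- B replaces A's flag-based single pass by an explicit two-level index scan (segment start found by
-- the outer loop, closing index by an inner loop); same return value, no speed claim.

-- ===== PORT A =====
-- A's for-loop over range(len(arr)): structural recursion over arr carrying the index i and the
-- loop state (inLine, start, the two accumulators appended at the end), branch order as in Python.
def block2charsLoop (w : Int) (h_ : Int) (row_top : Int) (block_left : Int) :
    List Int → Int → Bool → Int → List (List Int) → List (List Int) →
    List (List Int) × List (List Int)
  | [], _, _, _, cbs, abs_ => (cbs, abs_)
  | x :: rest, i, inLine, start, cbs, abs_ =>
    if inLine = false ∧ x > 0 then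
      block2charsLoop w h_ row_top block_left rest (i + 1) true i cbs abs_
    else if i - start > 5 ∧ x < 1 ∧ inLine = true then
      let left := max (start - 1) 0
      let right := min w (i + 1)
      block2charsLoop w h_ row_top block_left rest (i + 1) false start
        (cbs ++ [[left, 0, right, h_]])
        (abs_ ++ [[block_left + left, row_top, block_left + right, row_top + h_]])
    else
      block2charsLoop w h_ row_top block_left rest (i + 1) inLine start cbs abs_

def block2chars (arr : List Int) (w : Int) (h_ : Int) (row_top : Int) (block_left : Int) : List (List Int) × List (List Int) :=
  block2charsLoop w h_ row_top block_left arr 0 false 0 [] []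

-- ===== PORT B =====
-- B's inner while loop: advance j until j - start > 5 and arr[j] < 1; returns the closing index j
-- together with the remaining suffix after j, or none if the array ends first.
def findClose (start : Int) : List Int → Int → Option (Int × List Int)
  | [], _ => none
  | x :: rest, j =>
    if j - start > 5 ∧ x < 1 then some (j, rest) else findClose start rest (j + 1)

theorem findClose_length (start : Int) :
    ∀ (xs : List Int) (j : Int) (r : Int × List Int),
      findClose start xs j = some r → r.2.length < xs.length := by
  intro xs
  induction xs with
  | nil => intro j r h; simp [findClose] at h
  | cons x rest ih =>
    intro j r h
    simp only [findClose] at h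
    split at h
    · cases h; simpa using Nat.lt_succ_of_le (Nat.le_refl _)
    · exact Nat.lt_succ_of_lt (ih (j + 1) r h)

-- B's outer while loop: recursion over the current suffix carrying its absolute start index i.
def scanB (w : Int) (h_ : Int) (row_top : Int) (block_left : Int) :
    List Int → Int → List (List Int) × List (List Int)
  | [], _ => ([], [])
  | x :: rest, i =>
    if x > 0 then
      match hfc : findClose i rest (i + 1) with
      | none => ([], [])
      | some (j, rest') =>
        let left := max (i - 1) 0
        let right := min w (j + 1)
        let p := scanB w h_ row_top block_left rest' (j + 1)
        ([left, 0, right, h_] :: p.1,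
         [block_left + left, row_top, block_left + right, row_top + h_] :: p.2)
    else
      scanB w h_ row_top block_left rest (i + 1)
termination_by xs => xs.length
decreasing_by
  · exact Nat.lt_succ_of_lt (findClose_length i rest (i + 1) _ hfc)
  · simp

def block2chars_alt (arr : List Int) (w : Int) (h_ : Int) (row_top : Int) (block_left : Int) : List (List Int) × List (List Int) :=
  scanB w h_ row_top block_left arr 0

-- ===== PRECONDITION & SPEC =====
def Spec_block2chars (arr : List Int) (w : Int) (h_ : Int) (row_top : Int) (block_left : Int) (out : List (List Int) × List (List Int)) : Prop := out = block2chars_alt arr w h_ row_top block_left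
instance (arr : List Int) (w : Int) (h_ : Int) (row_top : Int) (block_left : Int) (out : List (List Int) × List (List Int)) : Decidable (Spec_block2chars arr w h_ row_top block_left out) := by unfold Spec_block2chars; infer_instance

-- ===== CLAIM (what is proved, stated in full; the proofs are below) =====
def Claim_equal_block2chars : Prop := ∀ (arr : List Int) (w : Int) (h_ : Int) (row_top : Int) (block_left : Int), Dom_block2chars arr w h_ row_top block_left → Spec_block2chars arr w h_ row_top block_left (block2chars arr w h_ row_top block_left)

-- ===== LEMMAS AND PROOFS =====

-- Combined invariant, by structural induction on the suffix:
--  (L1) out of a segment (inLine = false), A's loop appends exactly what B's scan produces;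
--  (L2) inside a segment started at s, A's loop appends the segment's box iff findClose finds a
--       closing index, then continues as B does after it.
theorem loop_scan (w h_ rt bl : Int) :
    ∀ (xs : List Int),
      (∀ (i start : Int) (cbs abs_ : List (List Int)),
        block2charsLoop w h_ rt bl xs i false start cbs abs_ =
          (cbs ++ (scanB w h_ rt bl xs i).1, abs_ ++ (scanB w h_ rt bl xs i).2)) ∧
      (∀ (s i : Int) (cbs abs_ : List (List Int)),
        block2charsLoop w h_ rt bl xs i true s cbs abs_ =
          match findClose s xs i with
          | none => (cbs, abs_)
          | some (j, rest') =>
            (cbs ++ [max (s - 1) 0, 0, min w (j + 1), h_] :: (scanB w h_ rt bl rest' (j + 1)).1,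
             abs_ ++ [bl + max (s - 1) 0, rt, bl + min w (j + 1), rt + h_] ::
               (scanB w h_ rt bl rest' (j + 1)).2)) := by
  intro xs
  induction xs with
  | nil =>
    constructor
    · intro i start cbs abs_; simp [block2charsLoop, scanB]
    · intro s i cbs abs_; simp [block2charsLoop, findClose]
  | cons x rest ih =>
    obtain ⟨ih1, ih2⟩ := ih
    constructor
    · intro i start cbs abs_
      by_cases hx : x > 0
      · -- segment starts at i
        rw [show block2charsLoop w h_ rt bl (x :: rest) i false start cbs abs_ =
              block2charsLoop w h_ rt bl rest (i + 1) true i cbs abs_ by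
            simp [block2charsLoop, hx]]
        rw [ih2 i (i + 1) cbs abs_]
        rw [show scanB w h_ rt bl (x :: rest) i =
              (match findClose i rest (i + 1) with
               | none => ([], [])
               | some (j, rest') =>
                 ([max (i - 1) 0, 0, min w (j + 1), h_] :: (scanB w h_ rt bl rest' (j + 1)).1,
                  [bl + max (i - 1) 0, rt, bl + min w (j + 1), rt + h_] ::
                    (scanB w h_ rt bl rest' (j + 1)).2)) by
            rw [scanB]; simp only [hx, if_pos]
            rcases findClose i rest (i + 1) with _ | ⟨j, rest'⟩ <;> simp]
        rcases findClose i rest (i + 1) with _ | ⟨j, rest'⟩ <;> simp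
      · -- skip
        rw [show block2charsLoop w h_ rt bl (x :: rest) i false start cbs abs_ =
              block2charsLoop w h_ rt bl rest (i + 1) false start cbs abs_ by
            simp [block2charsLoop, hx]]
        rw [show scanB w h_ rt bl (x :: rest) i = scanB w h_ rt bl rest (i + 1) by
            rw [scanB]; simp [hx]]
        exact ih1 (i + 1) start cbs abs_
    · intro s i cbs abs_
      by_cases hcl : i - s > 5 ∧ x < 1
      · -- closing position
        rw [show block2charsLoop w h_ rt bl (x :: rest) i true s cbs abs_ =
              block2charsLoop w h_ rt bl rest (i + 1) false s
                (cbs ++ [[max (s - 1) 0, 0, min w (i + 1), h_]])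
                (abs_ ++ [[bl + max (s - 1) 0, rt, bl + min w (i + 1), rt + h_]]) by
            simp [block2charsLoop, hcl.1, hcl.2]]
        rw [ih1 (i + 1) s]
        rw [show findClose s (x :: rest) i = some (i, rest) by simp [findClose, hcl.1, hcl.2]]
        simp
      · -- stay inside the segment
        rw [show block2charsLoop w h_ rt bl (x :: rest) i true s cbs abs_ =
              block2charsLoop w h_ rt bl rest (i + 1) true s cbs abs_ by
            simp [block2charsLoop]; omega]
        rw [show findClose s (x :: rest) i = findClose s rest (i + 1) by
            simp [findClose]; omega]
        exact ih2 s (i + 1) cbs abs_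

-- ===== VERDICT (by name: the statement is the Claim_ definition above) =====
theorem block2chars_spec : Claim_equal_block2chars := by
  intro arr w h_ rt bl _
  unfold Spec_block2chars block2chars block2chars_alt
  simpa using (loop_scan w h_ rt bl arr).1 0 0 [] []
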